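-- pv_equiv track=rewrite | github.com/dbadeev/booknlp_ru | src/cobald_parser/pipeline.py | _enumerate_words
-- ===== SOURCE A (Python) =====
-- def _enumerate_words(words: list[str]) -> list[str]:
--     ids = []
--     current_id = 0
--     current_null_count = 0
--     for word in words:
--         if word == "#NULL":
--             current_null_count += 1
--             ids.append(f"{current_id}.{current_null_count}")
--         else:
--             current_id += 1
--             current_null_count = 0
--             ids.append(f"{current_id}")
--     return ids
-- ===== SOURCE B (Python) =====
-- def _enumerate_words(words: list[str]) -> list[str]:
--     # Run-based: scan maximal runs of "#NULL"/non-"#NULL" words and emit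
--     # each run's ids in bulk by arithmetic, instead of a per-word state machine.
--     ids = []
--     current_id = 0
--     i = 0
--     n = len(words)
--     while i < n:
--         j = i
--         if words[i] == "#NULL":
--             while j < n and words[j] == "#NULL":
--                 j += 1
--             ids.extend(f"{current_id}.{k}" for k in range(1, j - i + 1))
--         else:
--             while j < n and words[j] != "#NULL":
--                 j += 1
--             ids.extend(str(current_id + k) for k in range(1, j - i + 1))
--             current_id += j - i
--         i = j
--     return ids
-- ===== Notes on version B (the rewrite author's own statement) =====
-- stated objective: alternative
-- what changed: Replaced the per-word state machine (current_id/current_null_count updated word by word) with a run-based scan: maximal runs of #NULL/non-#NULL words are found by an inner index scan and each run's ids are emitted in bulk by arithmetic over the run length.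
import Mathlib
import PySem

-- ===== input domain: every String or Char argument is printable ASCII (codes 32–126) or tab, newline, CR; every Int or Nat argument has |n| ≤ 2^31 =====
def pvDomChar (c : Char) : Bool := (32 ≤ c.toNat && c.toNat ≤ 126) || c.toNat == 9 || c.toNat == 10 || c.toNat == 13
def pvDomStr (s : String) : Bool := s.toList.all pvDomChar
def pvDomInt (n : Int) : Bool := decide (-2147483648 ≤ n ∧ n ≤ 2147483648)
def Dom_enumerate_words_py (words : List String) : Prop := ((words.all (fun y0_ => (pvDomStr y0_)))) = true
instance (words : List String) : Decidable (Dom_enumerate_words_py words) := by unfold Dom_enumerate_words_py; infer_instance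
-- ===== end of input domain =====

-- B replaces A's per-word state machine by a run-based scan (maximal #NULL / non-#NULL runs,
-- ids emitted in bulk per run); same cost, alternative decomposition. Return values proved equal.

-- ===== PORT A =====
-- state: (ids, current_id, current_null_count)
def enumerate_words_py (words : List String) : List String :=
  (words.foldl
    (fun (st : List String × Int × Int) word =>
      if word == "#NULL" then
        (st.1 ++ [PySem.Int.toStr st.2.1 ++ "." ++ PySem.Int.toStr (st.2.2 + 1)], st.2.1, st.2.2 + 1)
      else
        (st.1 ++ [PySem.Int.toStr (st.2.1 + 1)], st.2.1 + 1, 0))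
    ([], 0, 0)).1

-- ===== PORT B =====
-- ids of a maximal #NULL run: current_id.1 … current_id.len
def pvEmitNulls (cid : Int) (run : List String) : List String :=
  (List.range run.length).map (fun (k : Nat) => PySem.Int.toStr cid ++ "." ++ PySem.Int.toStr ((k : Int) + 1))

-- ids of a maximal non-#NULL run: current_id+1 … current_id+len
def pvEmitWords (cid : Int) (run : List String) : List String :=
  (List.range run.length).map (fun (k : Nat) => PySem.Int.toStr (cid + (k : Int) + 1))

def pvAltGo (ws : List String) (cid : Int) : List String :=
  match ws with
  | [] => []
  | w :: t =>
    if w == "#NULL" then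
      pvEmitNulls cid ((w :: t).takeWhile (fun x => x == "#NULL")) ++
        pvAltGo ((w :: t).dropWhile (fun x => x == "#NULL")) cid
    else
      pvEmitWords cid ((w :: t).takeWhile (fun x => !(x == "#NULL"))) ++
        pvAltGo ((w :: t).dropWhile (fun x => !(x == "#NULL")))
          (cid + ((w :: t).takeWhile (fun x => !(x == "#NULL"))).length)
termination_by ws.length
decreasing_by
  · have hwb : ((fun x => x == "#NULL") w) = true := ‹(w == "#NULL") = true›
    rw [List.dropWhile_cons_of_pos (p := fun x => x == "#NULL") hwb]
    exact Nat.lt_succ_of_le (List.length_dropWhile_le _ _)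
  · have hwb : ((fun x => !(x == "#NULL")) w) = true := by
      have hf : (w == "#NULL") = false := by simpa using ‹¬ (w == "#NULL") = true›
      simp [hf]
    rw [List.dropWhile_cons_of_pos (p := fun x => !(x == "#NULL")) hwb]
    exact Nat.lt_succ_of_le (List.length_dropWhile_le _ _)

def enumerate_words_py_alt (words : List String) : List String := pvAltGo words 0

-- ===== PRECONDITION & SPEC =====
def Spec_enumerate_words_py (words : List String) (out : List String) : Prop := out = enumerate_words_py_alt words
instance (words : List String) (out : List String) : Decidable (Spec_enumerate_words_py words out) := by unfold Spec_enumerate_words_py; infer_instance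

-- ===== CLAIM (what is proved, stated in full; the proofs are below) =====
def Claim_equal_enumerate_words_py : Prop := ∀ (words : List String), Dom_enumerate_words_py words → Spec_enumerate_words_py words (enumerate_words_py words)

-- ===== LEMMAS AND PROOFS =====

-- A's loop body, named for the proofs
def pvStepA (st : List String × Int × Int) (word : String) : List String × Int × Int :=
  if word == "#NULL" then
    (st.1 ++ [PySem.Int.toStr st.2.1 ++ "." ++ PySem.Int.toStr (st.2.2 + 1)], st.2.1, st.2.2 + 1)
  else
    (st.1 ++ [PySem.Int.toStr (st.2.1 + 1)], st.2.1 + 1, 0)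

theorem enumerate_words_py_eq_foldl (words : List String) :
    enumerate_words_py words = (words.foldl pvStepA ([], 0, 0)).1 := rfl

-- head of a dropWhile fails the predicate (head? form of List.head_dropWhile_not)
theorem pv_head?_dropWhile_not {α : Type} (p : α → Bool) (l : List α) (x : α)
    (h : (l.dropWhile p).head? = some x) : p x = false := by
  induction l with
  | nil => simp at h
  | cons a t ih =>
    by_cases hp : p a = true
    · rw [List.dropWhile_cons_of_pos hp] at h; exact ih h
    · rw [List.dropWhile_cons_of_neg hp] at h
      simp only [List.head?_cons, Option.some.injEq] at h
      subst h
      exact Bool.eq_false_iff.mpr hp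

theorem pvRangeMapSucc {α : Type} (f : Nat → α) (n : Nat) :
    (List.range (n + 1)).map f = f 0 :: (List.range n).map (fun k => f (k + 1)) := by
  simp [List.range_succ_eq_map, List.map_map, Function.comp]

-- A over a run of #NULLs, from null-count c
theorem foldl_null_run (run : List String) (h : ∀ w ∈ run, w = "#NULL")
    (acc : List String) (cid c : Int) :
    run.foldl pvStepA (acc, cid, c) =
      (acc ++ (List.range run.length).map
          (fun (k : Nat) => PySem.Int.toStr cid ++ "." ++ PySem.Int.toStr (c + (k : Int) + 1)),
        cid, c + run.length) := by
  induction run generalizing acc c with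
  | nil => simp
  | cons w t ih =>
    have hw : w = "#NULL" := h w List.mem_cons_self
    simp only [List.foldl_cons, pvStepA, hw, beq_self_eq_true, if_pos]
    rw [ih (fun x hx => h x (List.mem_cons_of_mem _ hx)), List.length_cons, pvRangeMapSucc]
    refine Prod.ext ?_ (Prod.ext rfl ?_) <;> dsimp only
    · simp only [List.append_assoc, List.singleton_append]
      refine congrArg (acc ++ ·) (congrArg₂ (· :: ·) (by norm_num) ?_)
      refine List.map_congr_left (fun k _ => ?_)
      exact congrArg (fun z => PySem.Int.toStr cid ++ "." ++ PySem.Int.toStr z) (by push_cast; ring)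
    · push_cast; ring

-- A over a run of non-#NULLs
theorem foldl_word_run (run : List String) (h : ∀ w ∈ run, w ≠ "#NULL")
    (acc : List String) (cid c : Int) :
    run.foldl pvStepA (acc, cid, c) =
      (acc ++ pvEmitWords cid run, cid + run.length, if run.length = 0 then c else 0) := by
  induction run generalizing acc cid c with
  | nil => simp [pvEmitWords]
  | cons w t ih =>
    have hw : (w == "#NULL") = false := by simpa using h w List.mem_cons_self
    simp only [List.foldl_cons, pvStepA, hw, Bool.false_eq_true, if_neg, not_false_iff]
    rw [ih (fun x hx => h x (List.mem_cons_of_mem _ hx))]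
    refine Prod.ext ?_ (Prod.ext ?_ ?_) <;> dsimp only
    · simp only [pvEmitWords, List.length_cons, pvRangeMapSucc, List.append_assoc,
        List.singleton_append]
      refine congrArg (acc ++ ·) (congrArg₂ (· :: ·) (by norm_num) ?_)
      refine List.map_congr_left (fun k _ => ?_)
      exact congrArg PySem.Int.toStr (by push_cast; ring)
    · simp only [List.length_cons]; push_cast; ring
    · simp

-- main invariant: A's fold from null-count 0 (when the head is #NULL) equals B's run scan
theorem foldl_eq_altGo (n : Nat) : ∀ (ws : List String), ws.length ≤ n →
    ∀ (acc : List String) (cid c : Int), (ws.head? = some "#NULL" → c = 0) →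
    (ws.foldl pvStepA (acc, cid, c)).1 = acc ++ pvAltGo ws cid := by
  induction n with
  | zero =>
    intro ws hws acc cid c _
    have : ws = [] := List.eq_nil_of_length_eq_zero (Nat.le_zero.mp hws)
    subst this; simp [pvAltGo]
  | succ n ih =>
    intro ws hws acc cid c hc
    cases ws with
    | nil => simp [pvAltGo]
    | cons w t =>
      by_cases hw : w = "#NULL"
      · have hc0 : c = 0 := hc (by simp [hw])
        subst hc0
        have hwb : ((fun x => x == "#NULL") w) = true := by simp [hw]
        have hsplit := (List.takeWhile_append_dropWhile (p := fun x => x == "#NULL") (l := w :: t)).symm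
        set run := (w :: t).takeWhile (fun x => x == "#NULL") with hrun
        set rest := (w :: t).dropWhile (fun x => x == "#NULL") with hrest
        have hmem : ∀ x ∈ run, x = "#NULL" := by
          intro x hx
          simpa using List.mem_takeWhile_imp hx
        have hrun_cons : run = "#NULL" :: t.takeWhile (fun x => x == "#NULL") := by
          rw [hrun, List.takeWhile_cons_of_pos (p := fun x => x == "#NULL") hwb, hw]
        have hlen : rest.length ≤ n := by
          have h1 : run.length + rest.length = (w :: t).length := by
            rw [← List.length_append, hrun, hrest, List.takeWhile_append_dropWhile]
          have h2 : 1 ≤ run.length := by rw [hrun_cons]; simp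
          simp only [List.length_cons] at h1 hws
          omega
        have hhead : rest.head? = some "#NULL" → (0 + (run.length : Int)) = 0 := by
          intro hh
          rw [hrest] at hh
          have := pv_head?_dropWhile_not _ _ _ hh
          simp at this
        conv_lhs => rw [hsplit]
        rw [List.foldl_append, foldl_null_run run hmem acc cid 0,
          ih rest hlen _ cid (0 + (run.length : Int)) hhead]
        have haltgo : pvAltGo (w :: t) cid = pvEmitNulls cid run ++ pvAltGo rest cid := by
          rw [pvAltGo]
          simp only [hwb, if_pos, ← hrun, ← hrest]
        rw [haltgo, pvEmitNulls, List.append_assoc]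
        refine congrArg (acc ++ ·) (congrArg (· ++ _) ?_)
        refine List.map_congr_left (fun k _ => ?_)
        congr 2
        ring
      · have hwb : ((fun x => !(x == "#NULL")) w) = true := by simp [hw]
        have hwb' : (w == "#NULL") = false := by simp [hw]
        have hsplit := (List.takeWhile_append_dropWhile (p := fun x => !(x == "#NULL")) (l := w :: t)).symm
        set run := (w :: t).takeWhile (fun x => !(x == "#NULL")) with hrun
        set rest := (w :: t).dropWhile (fun x => !(x == "#NULL")) with hrest
        have hmem : ∀ x ∈ run, x ≠ "#NULL" := by
          intro x hx
          simpa using List.mem_takeWhile_imp hx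
        have hrun_cons : run = w :: t.takeWhile (fun x => !(x == "#NULL")) := by
          rw [hrun, List.takeWhile_cons_of_pos (p := fun x => !(x == "#NULL")) hwb]
        have hlen : rest.length ≤ n := by
          have h1 : run.length + rest.length = (w :: t).length := by
            rw [← List.length_append, hrun, hrest, List.takeWhile_append_dropWhile]
          have h2 : 1 ≤ run.length := by rw [hrun_cons]; simp
          simp only [List.length_cons] at h1 hws
          omega
        have hrunne : run.length ≠ 0 := by rw [hrun_cons]; simp
        have hhead : rest.head? = some "#NULL" → (0 : Int) = 0 := fun _ => rfl
        conv_lhs => rw [hsplit]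
        rw [List.foldl_append, foldl_word_run run hmem acc cid c, if_neg hrunne,
          ih rest hlen _ (cid + run.length) 0 hhead]
        have haltgo : pvAltGo (w :: t) cid =
            pvEmitWords cid run ++ pvAltGo rest (cid + run.length) := by
          rw [pvAltGo]
          simp only [hwb', Bool.false_eq_true, if_neg, not_false_iff, ← hrun, ← hrest]
        rw [haltgo, List.append_assoc]

-- ===== VERDICT (by name: the statement is the Claim_ definition above) =====
theorem enumerate_words_py_spec : Claim_equal_enumerate_words_py := by
  intro words _
  unfold Spec_enumerate_words_py
  rw [enumerate_words_py_eq_foldl, enumerate_words_py_alt,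
    foldl_eq_altGo words.length words le_rfl [] 0 0 (fun _ => rfl)]
  simp
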